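-- pv_equiv track=rewrite | github.com/RoschildRui/CC-Agent | agent/utils/web_search_pipeline.py | pick_large_model_name
-- ===== SOURCE A (Python) =====
-- from typing import Dict, List, Optional, Tuple
--
-- def pick_large_model_name(model_pool) -> Optional[str]:
--     """
--     Best-effort choice: prefer reasoning/large models when present; fallback to None (random).
--     """
--     if not model_pool:
--         return None
--     names = list(model_pool.keys())
--     preferred_keywords = [
--         "DeepSeek-R1",
--         "DeepSeek-V3",
--         "deepseek-reasoner",
--         "deepseek-chat",
--         "kimi-k2",
--     ]
--     for kw in preferred_keywords:
--         for n in names: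
--             if kw.lower() in n.lower():
--                 return n
--     return names[0] if names else None
-- ===== SOURCE B (Python) =====
-- def pick_large_model_name(model_pool):
--     """Score each name by the index of the first preferred keyword it contains
--     (sentinel = number of keywords), then return the first name achieving the
--     minimum score; None for an empty pool."""
--     if not model_pool:
--         return None
--     keywords = ["deepseek-r1", "deepseek-v3", "deepseek-reasoner",
--                 "deepseek-chat", "kimi-k2"]
--     names = list(model_pool.keys())
--
--     def rank(name):
--         low = name.lower()
--         return next((i for i, kw in enumerate(keywords) if kw in low),
--                     len(keywords))
--
--     ranks = [rank(n) for n in names]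
--     m = len(keywords)
--     for r in ranks:
--         if r < m:
--             m = r
--     return next((n for n, r in zip(names, ranks) if r == m), None)
-- ===== Notes on version B (the rewrite author's own statement) =====
-- stated objective: alternative
-- what changed: A scans keyword-major with two nested loops and an early return plus a separate fallback; B scores each name once with a priority rank (index of first contained keyword, sentinel = number of keywords, lowercasing each name once), takes the minimum rank in one pass and returns the first name achieving it, which subsumes the fallback.
import Mathlib
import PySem

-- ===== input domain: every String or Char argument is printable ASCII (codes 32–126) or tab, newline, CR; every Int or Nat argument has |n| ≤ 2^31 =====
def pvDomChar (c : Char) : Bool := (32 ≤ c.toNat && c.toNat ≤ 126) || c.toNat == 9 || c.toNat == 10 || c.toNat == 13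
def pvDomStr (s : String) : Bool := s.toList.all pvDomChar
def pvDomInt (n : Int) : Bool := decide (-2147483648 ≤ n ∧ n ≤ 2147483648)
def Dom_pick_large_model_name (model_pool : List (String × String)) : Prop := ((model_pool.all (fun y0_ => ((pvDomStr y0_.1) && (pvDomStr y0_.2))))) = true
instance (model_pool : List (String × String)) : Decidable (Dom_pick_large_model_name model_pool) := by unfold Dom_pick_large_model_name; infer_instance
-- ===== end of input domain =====

-- B re-implements A by scoring each name once (index of first preferred keyword it
-- contains, sentinel = #keywords) and taking the first argmin, instead of A's
-- keyword-major double scan; B lowercases each name once (objective: alternative).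

-- ===== PORT A =====
-- outer 'for kw in preferred_keywords' loop with early return; the inner
-- 'for n in names: if kw.lower() in n.lower(): return n' is names.find?
def aScan : List String → List String → Option String
  | [], _ => none
  | kw :: rest, names =>
    match names.find? (fun n => PySem.Str.isIn (PySem.Str.lower kw) (PySem.Str.lower n)) with
    | some n => some n
    | none => aScan rest names

def pick_large_model_name (model_pool : List (String × String)) : Option String :=
  if model_pool.isEmpty then none
  else
    let names := (PySem.Dict.mk model_pool).keys
    match aScan ["DeepSeek-R1", "DeepSeek-V3", "deepseek-reasoner", "deepseek-chat", "kimi-k2"] names with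
    | some n => some n
    | none => names.head?   -- names[0] if names else None

-- ===== PORT B =====
-- rank(name): index of the first keyword contained in name.lower(), else len(keywords)
def altRank : List String → String → Nat
  | [], _ => 0
  | kw :: rest, low => if PySem.Str.isIn kw low then 0 else altRank rest low + 1

def pick_large_model_name_alt (model_pool : List (String × String)) : Option String :=
  if model_pool.isEmpty then none
  else
    let keywords := ["deepseek-r1", "deepseek-v3", "deepseek-reasoner", "deepseek-chat", "kimi-k2"]
    let names := (PySem.Dict.mk model_pool).keys
    let ranks := names.map (fun n => altRank keywords (PySem.Str.lower n))
    let m := ranks.foldl (fun m r => if r < m then r else m) keywords.length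
    (((names.zip ranks).find? (fun p => p.2 == m)).map Prod.fst)

-- ===== PRECONDITION & SPEC =====
def Spec_pick_large_model_name (model_pool : List (String × String)) (out : Option String) : Prop := out = pick_large_model_name_alt model_pool
instance (model_pool : List (String × String)) (out : Option String) : Decidable (Spec_pick_large_model_name model_pool out) := by unfold Spec_pick_large_model_name; infer_instance

-- ===== CLAIM (what is proved, stated in full; the proofs are below) =====
def Claim_equal_pick_large_model_name : Prop := ∀ (model_pool : List (String × String)), Dom_pick_large_model_name model_pool → Spec_pick_large_model_name model_pool (pick_large_model_name model_pool)

-- ===== LEMMAS AND PROOFS =====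

-- hit with an already-lowered keyword
def pvHit (kw n : String) : Bool := PySem.Str.isIn kw (PySem.Str.lower n)

-- aScan over pre-lowered keywords
def aScan' : List String → List String → Option String
  | [], _ => none
  | kw :: rest, names =>
    match names.find? (fun n => pvHit kw n) with
    | some n => some n
    | none => aScan' rest names

theorem aScan_eq_aScan' (kws names : List String) :
    aScan kws names = aScan' (kws.map PySem.Str.lower) names := by
  induction kws with
  | nil => rfl
  | cons kw rest ih =>
    simp only [aScan, List.map, aScan']
    rw [ih]; rfl

def pvRk (kws : List String) (n : String) : Nat := altRank kws (PySem.Str.lower n)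

theorem rk_cons (kw : String) (rest : List String) (n : String) :
    pvRk (kw :: rest) n = if pvHit kw n then 0 else pvRk rest n + 1 := rfl

theorem rk_le_length (kws : List String) (n : String) : pvRk kws n ≤ kws.length := by
  induction kws with
  | nil => simp [pvRk, altRank]
  | cons kw rest ih =>
    rw [rk_cons]
    split
    · simp
    · simp only [List.length]; omega

theorem find?_congr_mem {α : Type} (l : List α) (p q : α → Bool)
    (h : ∀ x ∈ l, p x = q x) : l.find? p = l.find? q := by
  induction l with
  | nil => rfl
  | cons x xs ih =>
    have hx := h x (by simp)
    simp only [List.find?]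
    rw [hx]
    cases q x
    · exact ih (fun y hy => h y (by simp [hy]))
    · rfl

theorem find?_zip_map {α : Type} (names : List α) (f : α → Nat) (p : Nat → Bool) :
    (((names.zip (names.map f)).find? (fun q => p q.2)).map Prod.fst)
      = names.find? (fun n => p (f n)) := by
  induction names with
  | nil => rfl
  | cons n rest ih =>
    simp only [List.map, List.zip, List.zipWith, List.find?]
    rw [show (p (n, f n).2) = p (f n) from rfl]
    cases hp : p (f n)
    · simpa using ih
    · simp

theorem find?_eq_head?_of_all {α : Type} (l : List α) (p : α → Bool)
    (h : ∀ x ∈ l, p x = true) : l.find? p = l.head? := by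
  cases l with
  | nil => rfl
  | cons x xs => simp [List.find?, h x (by simp)]

theorem foldl_min_le_init (l : List Nat) (a : Nat) : l.foldl Nat.min a ≤ a := by
  induction l generalizing a with
  | nil => simp [List.foldl]
  | cons y ys ih =>
    simp only [List.foldl]
    calc ys.foldl Nat.min (Nat.min a y) ≤ Nat.min a y := ih _
      _ ≤ a := Nat.min_le_left a y

theorem foldl_min_le_mem (l : List Nat) : ∀ (a x : Nat), x ∈ l → l.foldl Nat.min a ≤ x := by
  induction l with
  | nil => intro a x hx; cases hx
  | cons y ys ih =>
    intro a x hx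
    simp only [List.foldl]
    rcases List.mem_cons.mp hx with h | h
    · subst h
      calc ys.foldl Nat.min (Nat.min a x) ≤ Nat.min a x := foldl_min_le_init ys _
        _ ≤ x := Nat.min_le_right a x
    · exact ih _ x h

theorem foldl_min_mem_or (l : List Nat) (a : Nat) :
    l.foldl Nat.min a = a ∨ l.foldl Nat.min a ∈ l := by
  induction l generalizing a with
  | nil => left; rfl
  | cons y ys ih =>
    simp only [List.foldl]
    rcases ih (Nat.min a y) with h | h
    · rw [h]
      rcases Nat.lt_or_ge y a with hlt | hle
      · right
        have hy : Nat.min a y = y := by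
          show (if a ≤ y then a else y) = y
          rw [if_neg (by omega)]
        rw [hy]
        exact List.mem_cons_self
      · left
        show (if a ≤ y then a else y) = a
        rw [if_pos hle]
    · right; right; exact h

-- A's keyword-major scan returns the first name of minimal rank m, when m is achieved
theorem scan_spec (kws : List String) : ∀ (names : List String) (m : Nat),
    (∀ n ∈ names, m ≤ pvRk kws n) → (∃ n ∈ names, pvRk kws n = m) → m < kws.length →
    aScan' kws names = names.find? (fun n => pvRk kws n == m) := by
  induction kws with
  | nil => intro names m _ _ hm; simp at hm
  | cons kw rest ih =>
    intro names m hlb hex hm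
    cases m with
    | zero =>
      have hpt : ∀ n, (pvRk (kw :: rest) n == 0) = pvHit kw n := by
        intro n
        rw [rk_cons]
        cases h : pvHit kw n <;> simp
      rw [show names.find? (fun n => pvRk (kw :: rest) n == 0)
            = names.find? (fun n => pvHit kw n) from
            find?_congr_mem _ _ _ (fun n _ => hpt n)]
      obtain ⟨n0, hn0, hr0⟩ := hex
      have hhit : pvHit kw n0 = true := by
        rw [rk_cons] at hr0
        by_contra h
        simp [Bool.not_eq_true] at h
        simp [h] at hr0
      have : (names.find? (fun n => pvHit kw n)).isSome := by
        rw [List.find?_isSome]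
        exact ⟨n0, hn0, hhit⟩
      obtain ⟨v, hv⟩ := Option.isSome_iff_exists.mp this
      simp only [aScan', hv]
    | succ m' =>
      have hnohit : ∀ n ∈ names, pvHit kw n = false := by
        intro n hn
        have := hlb n hn
        rw [rk_cons] at this
        by_contra h
        simp [Bool.not_eq_false] at h
        simp [h] at this
      have hnone : names.find? (fun n => pvHit kw n) = none :=
        List.find?_eq_none.mpr (fun n hn => by simp [hnohit n hn])
      have hshift : ∀ n ∈ names, pvRk (kw :: rest) n = pvRk rest n + 1 := by
        intro n hn; rw [rk_cons, hnohit n hn]; simp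
      simp only [aScan', hnone]
      rw [ih names m'
            (fun n hn => by have := hlb n hn; rw [hshift n hn] at this; omega)
            (by obtain ⟨n0, hn0, hr0⟩ := hex
                exact ⟨n0, hn0, by rw [hshift n0 hn0] at hr0; omega⟩)
            (by simp [List.length] at hm; omega)]
      apply find?_congr_mem
      intro n hn
      rw [hshift n hn]
      cases h : pvRk rest n == m' <;> simp at h <;> simp [h]

theorem scan_none (kws : List String) : ∀ (names : List String),
    (∀ n ∈ names, pvRk kws n = kws.length) → aScan' kws names = none := by
  induction kws with
  | nil => intro names _; rfl
  | cons kw rest ih =>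
    intro names hall
    have hnohit : ∀ n ∈ names, pvHit kw n = false := by
      intro n hn
      have := hall n hn
      rw [rk_cons] at this
      by_contra h
      simp [Bool.not_eq_false] at h
      simp [h, List.length] at this
    have hnone : names.find? (fun n => pvHit kw n) = none :=
      List.find?_eq_none.mpr (fun n hn => by simp [hnohit n hn])
    simp only [aScan', hnone]
    exact ih names (fun n hn => by
      have := hall n hn
      rw [rk_cons, hnohit n hn] at this
      simp [List.length] at this
      simpa using this)

theorem step_eq_min : (fun (m r : Nat) => if r < m then r else m) = Nat.min := by
  funext m r
  show (if r < m then r else m) = (if m ≤ r then m else r)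
  rcases Nat.lt_or_ge r m with h | h
  · rw [if_pos h, if_neg (by omega)]
  · rw [if_neg (by omega), if_pos h]

-- master lemma: A's scan+fallback equals B's argmin, for any keyword list
theorem master (kws names : List String) :
    (match aScan' kws names with
     | some n => some n
     | none => names.head?)
    = (((names.zip (names.map (fun n => pvRk kws n))).find?
          (fun p => p.2 == (names.map (fun n => pvRk kws n)).foldl Nat.min kws.length)).map Prod.fst) := by
  set R : String → Nat := fun n => pvRk kws n with hR
  set m := (names.map R).foldl Nat.min kws.length with hm
  have hlb : ∀ n ∈ names, m ≤ R n := by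
    intro n hn
    exact foldl_min_le_mem _ _ _ (List.mem_map_of_mem hn)
  rw [find?_zip_map names R (fun r => r == m)]
  rcases Nat.lt_or_ge m kws.length with hlt | hge
  · -- m < #kws: some keyword matched; m is an achieved rank
    have hex : ∃ n ∈ names, R n = m := by
      rcases foldl_min_mem_or (names.map R) kws.length with h | h
      · omega
      · obtain ⟨n, hn, hrn⟩ := List.mem_map.mp h
        exact ⟨n, hn, hrn⟩
    rw [scan_spec kws names m hlb hex hlt]
    obtain ⟨n0, hn0, hr0⟩ := hex
    have : (names.find? (fun n => R n == m)).isSome := by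
      rw [List.find?_isSome]
      exact ⟨n0, hn0, by simp [hr0]⟩
    obtain ⟨v, hv⟩ := Option.isSome_iff_exists.mp this
    have hv' : List.find? (fun n => pvRk kws n == m) names = some v := hv
    rw [hv']
  · -- no keyword matched anywhere: every rank is the sentinel
    have hall : ∀ n ∈ names, R n = kws.length := by
      intro n hn
      have h1 := hlb n hn
      have h2 := rk_le_length kws n
      have : R n = pvRk kws n := rfl
      omega
    have hminit : m ≤ kws.length := foldl_min_le_init _ _
    have hmeq : m = kws.length := le_antisymm hminit hge
    rw [scan_none kws names hall]
    rw [find?_eq_head?_of_all names _ (fun n hn => by simp [hall n hn, hmeq])]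

-- ===== VERDICT (by name: the statement is the Claim_ definition above) =====
theorem pick_large_model_name_spec : Claim_equal_pick_large_model_name := by
  intro mp _
  unfold Spec_pick_large_model_name pick_large_model_name pick_large_model_name_alt
  by_cases h : mp.isEmpty
  · simp [h]
  · simp only [h]
    rw [aScan_eq_aScan']
    have hkw : ([ "DeepSeek-R1", "DeepSeek-V3", "deepseek-reasoner", "deepseek-chat", "kimi-k2"] : List String).map PySem.Str.lower
        = ["deepseek-r1", "deepseek-v3", "deepseek-reasoner", "deepseek-chat", "kimi-k2"] := by decide
    rw [hkw, step_eq_min]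
    exact master _ _
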